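-- pv_equiv track=rewrite | github.com/NUSTM/DALM | absa/eval_utils.py | tag2aspect_sentiment
-- ===== SOURCE A (Python) =====
-- def tag2aspect_sentiment(ts_tag_sequence):
--     '''
--     support Tag sequence: ['O', 'B-POS', 'B-NEG', 'B-NEU', 'I-POS', 'I-NEG', 'I-NEU']
--     '''
--     ts_sequence, sentiments = [], []
--     beg, end = -1, -1
--     for index, ts_tag in enumerate(ts_tag_sequence):
--         if ts_tag == 'O':
--             if beg != -1:
--                 ts_sequence.append((beg, index-1, sentiments[0]))
--                 beg, sentiments = -1, []
--         else:
--             cur, pos = ts_tag.split('-')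
--             if cur == 'B':
--                 if beg != -1:
--                     ts_sequence.append((beg, index-1, sentiments[0]))
--                 beg, sentiments = index, [pos]
--             else:
--                 if beg != -1:
--                     sentiments.append(pos)
--     if beg != -1:
--         ts_sequence.append((beg, index, sentiments[0]))
--     return ts_sequence
-- ===== SOURCE B (Python) =====
-- def tag2aspect_sentiment(ts_tag_sequence):
--     '''
--     support Tag sequence: ['O', 'B-POS', 'B-NEG', 'B-NEU', 'I-POS', 'I-NEG', 'I-NEU']
--     '''
--     # phase 0: parse every tag into None (for 'O') or its (prefix, sentiment) pair
--     parsed = []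
--     for t in ts_tag_sequence:
--         if t == 'O':
--             parsed.append(None)
--         else:
--             cur, pos = t.split('-')
--             parsed.append((cur, pos))
--     # phase 1: every 'B' tag starts a span
--     starts = [i for i in range(len(parsed)) if parsed[i] is not None and parsed[i][0] == 'B']
--     # phase 2: extend each start forward to the last following non-'O', non-'B' tag
--     result = []
--     for i in starts:
--         end = i
--         while end + 1 < len(parsed):
--             nxt = parsed[end + 1]
--             if nxt is None or nxt[0] == 'B':
--                 break
--             end += 1
--         result.append((i, end, parsed[i][1]))
--     return result
-- ===== Notes on version B (the rewrite author's own statement) =====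
-- stated objective: alternative
-- what changed: Replaces A's single-pass open/close state machine (beg/sentiments accumulator) with a two-phase traversal: first collect all 'B' start indices, then extend each start forward to the last following non-O/non-B tag.
import Mathlib
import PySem

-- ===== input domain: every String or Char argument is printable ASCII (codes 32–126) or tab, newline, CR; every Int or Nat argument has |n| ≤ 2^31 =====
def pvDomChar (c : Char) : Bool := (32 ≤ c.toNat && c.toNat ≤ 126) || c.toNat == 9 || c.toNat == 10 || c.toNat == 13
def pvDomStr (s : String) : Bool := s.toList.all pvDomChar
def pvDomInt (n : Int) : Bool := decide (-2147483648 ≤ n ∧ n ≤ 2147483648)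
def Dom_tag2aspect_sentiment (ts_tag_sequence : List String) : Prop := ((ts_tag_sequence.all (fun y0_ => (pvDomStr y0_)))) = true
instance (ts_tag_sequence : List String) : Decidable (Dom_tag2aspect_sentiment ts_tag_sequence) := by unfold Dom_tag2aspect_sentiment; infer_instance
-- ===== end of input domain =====

-- B replaces A's single open/close state machine by a two-phase traversal (collect all 'B' start
-- indices, then extend each start forward to its span end); same value, similar cost (objective: alternative).

-- ===== PORT A =====
-- the loop of A: state (ts_sequence, sentiments, beg), index carried explicitly
def t2aGo (xs : List String) (i : Int) (acc : List (Int × Int × String))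
    (sents : List String) (beg : Int) : List (Int × Int × String) × List String × Int :=
  match xs with
  | [] => (acc, sents, beg)
  | t :: rest =>
    if t == "O" then
      if beg ≠ -1 then t2aGo rest (i+1) (acc ++ [(beg, i-1, sents.getD 0 "")]) [] (-1)
      else t2aGo rest (i+1) acc sents beg
    else
      -- cur, pos = ts_tag.split('-')  (exactly two pieces under Pre_; getD defaults outside it)
      let parts := (PySem.Str.split? t "-").getD []
      let cur := parts.getD 0 ""
      let pos := parts.getD 1 ""
      if cur == "B" then
        if beg ≠ -1 then t2aGo rest (i+1) (acc ++ [(beg, i-1, sents.getD 0 "")]) [pos] i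
        else t2aGo rest (i+1) acc [pos] i
      else
        if beg ≠ -1 then t2aGo rest (i+1) acc (sents ++ [pos]) beg
        else t2aGo rest (i+1) acc sents beg

def tag2aspect_sentiment (ts_tag_sequence : List String) : List (Int × Int × String) :=
  match t2aGo ts_tag_sequence 0 [] [] (-1) with
  | (acc, sents, beg) =>
    -- final 'if beg != -1': the leftover loop index equals len - 1 (beg ≠ -1 forces a nonempty list)
    if beg ≠ -1 then acc ++ [(beg, (ts_tag_sequence.length : Int) - 1, sents.getD 0 "")] else acc

-- ===== PORT B =====
-- phase 0 of Source B: 'O' ↦ None, other tags ↦ (cur, pos) from cur, pos = t.split('-')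
-- (exactly two pieces under Pre_; getD defaults outside it)
def t2bParse (t : String) : Option (String × String) :=
  if t == "O" then none
  else
    let parts := (PySem.Str.split? t "-").getD []
    some (parts.getD 0 "", parts.getD 1 "")

-- parsed[i] is not None and parsed[i][0] == 'B'
def t2bStartP : Option (String × String) → Bool
  | none => false
  | some pr => pr.1 == "B"

-- nxt is None or nxt[0] == 'B'  (the while-loop break condition)
def t2bStopP : Option (String × String) → Bool
  | none => true
  | some pr => pr.1 == "B"

-- parsed[i][1]; the None case is unreachable at a start index
def t2bSent : Option (String × String) → String
  | none => ""
  | some pr => pr.2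

-- the while loop: extend end while end+1 in range and the next entry does not stop the span
-- (fuel = number of indices left above j, so 'fuel = 0' is exactly 'end + 1 < n' failing)
def t2bExtendGo (parsed : List (Option (String × String))) : Nat → Nat → Nat
  | 0, j => j
  | fuel+1, j => if t2bStopP (parsed.getD (j+1) none) then j else t2bExtendGo parsed fuel (j+1)

def t2bExtend (parsed : List (Option (String × String))) (j : Nat) : Nat :=
  t2bExtendGo parsed (parsed.length - (j+1)) j

def tag2aspect_sentiment_alt (ts_tag_sequence : List String) : List (Int × Int × String) :=
  let parsed := ts_tag_sequence.map t2bParse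
  ((List.range parsed.length).filter (fun i => t2bStartP (parsed.getD i none))).map
    (fun (i : Nat) => ((i : Int), ((t2bExtend parsed i : Nat) : Int), t2bSent (parsed.getD i none)))

-- ===== PRECONDITION & SPEC =====
-- Pre_ excludes exactly the inputs where A raises ValueError: a tag other than 'O' whose
-- split('-') does not have exactly two pieces (dash count ≠ 1).
def Pre_tag2aspect_sentiment (ts_tag_sequence : List String) : Prop :=
  ∀ t ∈ ts_tag_sequence, t = "O" ∨ PySem.Str.count t "-" = 1
instance (ts_tag_sequence : List String) : Decidable (Pre_tag2aspect_sentiment ts_tag_sequence) := by unfold Pre_tag2aspect_sentiment; infer_instance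
def pvWitness_tag2aspect_sentiment : List String := ["O", "B-POS", "I-POS", "O", "B-NEG"]

def Spec_tag2aspect_sentiment (ts_tag_sequence : List String) (out : List (Int × Int × String)) : Prop := out = tag2aspect_sentiment_alt ts_tag_sequence
instance (ts_tag_sequence : List String) (out : List (Int × Int × String)) : Decidable (Spec_tag2aspect_sentiment ts_tag_sequence out) := by unfold Spec_tag2aspect_sentiment; infer_instance

-- ===== CLAIM (what is proved, stated in full; the proofs are below) =====
def Claim_equal_tag2aspect_sentiment : Prop := ∀ (ts_tag_sequence : List String), Dom_tag2aspect_sentiment ts_tag_sequence → Pre_tag2aspect_sentiment ts_tag_sequence → Spec_tag2aspect_sentiment ts_tag_sequence (tag2aspect_sentiment ts_tag_sequence)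

-- ===== LEMMAS AND PROOFS =====

def t2bIsStop (t : String) : Bool := t == "O" || ((PySem.Str.split? t "-").getD []).getD 0 "" == "B"
def t2bIsStart (t : String) : Bool := t ≠ "O" && ((PySem.Str.split? t "-").getD []).getD 0 "" == "B"
def t2bNotStop (t : String) : Bool := !(t2bIsStop t)

lemma go_eq (l : List (Option (String × String))) (fuel : Nat) : ∀ j, fuel = l.length - (j+1) →
    t2bExtendGo l fuel j = j + ((l.drop (j+1)).takeWhile (fun x => !t2bStopP x)).length := by
  induction fuel with
  | zero =>
    intro j h
    have : l.drop (j+1) = [] := List.drop_eq_nil_of_le (by omega)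
    simp [t2bExtendGo, this]
  | succ fuel ih =>
    intro j h
    have hlt : j + 1 < l.length := by omega
    have hd : l.drop (j+1) = l[j+1] :: l.drop (j+2) := List.drop_eq_getElem_cons hlt
    have hg : l.getD (j+1) none = l[j+1] := List.getD_eq_getElem l none hlt
    rw [t2bExtendGo, hg, hd]
    by_cases hs : t2bStopP l[j+1]
    · simp [hs]
    · have hih := ih (j+1) (by omega)
      have e : j + 1 + 1 = j + 2 := by omega
      rw [e] at hih
      rw [if_neg hs, hih]
      simp only [List.takeWhile_cons, hs]
      simp
      omega

lemma t2bExtend_eq (l : List (Option (String × String))) (j : Nat) :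
    t2bExtend l j = j + ((l.drop (j+1)).takeWhile (fun x => !t2bStopP x)).length :=
  go_eq l _ j rfl

lemma parse_notStop (t : String) : (!t2bStopP (t2bParse t)) = t2bNotStop t := by
  by_cases ht : t = "O"
  · subst ht; decide
  · simp [t2bParse, ht, t2bStopP, t2bNotStop, t2bIsStop]

lemma parse_start_pt (t : String) : t2bStartP (t2bParse t) = t2bIsStart t := by
  by_cases ht : t = "O"
  · subst ht; decide
  · simp [t2bParse, ht, t2bStartP, t2bIsStart]

lemma parse_sent_pt (t : String) : t2bSent (t2bParse t) = ((PySem.Str.split? t "-").getD []).getD 1 "" := by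
  by_cases ht : t = "O"
  · subst ht; decide
  · simp [t2bParse, ht, t2bSent]

lemma parse_start (l : List String) (i : Nat) :
    t2bStartP ((l.map t2bParse).getD i none) = t2bIsStart (l.getD i "") := by
  by_cases hi : i < l.length
  · rw [List.getD_eq_getElem _ none (by simpa using hi), List.getD_eq_getElem l "" hi,
      List.getElem_map]
    exact parse_start_pt _
  · rw [List.getD_eq_default _ none (by simpa using hi), List.getD_eq_default l "" (by omega)]
    decide

lemma parse_sent (l : List String) (i : Nat) :
    t2bSent ((l.map t2bParse).getD i none) = ((PySem.Str.split? (l.getD i "") "-").getD []).getD 1 "" := by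
  by_cases hi : i < l.length
  · rw [List.getD_eq_getElem _ none (by simpa using hi), List.getD_eq_getElem l "" hi,
      List.getElem_map]
    exact parse_sent_pt _
  · rw [List.getD_eq_default _ none (by simpa using hi), List.getD_eq_default l "" (by omega)]
    decide

lemma extend_map (l : List String) (i : Nat) :
    t2bExtend (l.map t2bParse) i = i + ((l.drop (i+1)).takeWhile t2bNotStop).length := by
  rw [t2bExtend_eq, ← List.map_drop, List.takeWhile_map, List.length_map]
  have hp : (fun x => !t2bStopP (t2bParse x)) = t2bNotStop := funext parse_notStop
  rw [show ((fun x => !t2bStopP x) ∘ t2bParse) = t2bNotStop from hp]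

def t2Spec : List String → Int → List (Int × Int × String)
  | [], _ => []
  | t :: rest, i =>
    if t2bIsStart t then
      (i, i + ((rest.takeWhile t2bNotStop).length : Int), ((PySem.Str.split? t "-").getD []).getD 1 "")
        :: t2Spec rest (i+1)
    else t2Spec rest (i+1)

lemma t2b_gen (xs : List String) : ∀ (p : List String),
    ((List.range' p.length xs.length).filter
        (fun i => t2bIsStart ((p ++ xs).getD i ""))).map
      (fun (i : Nat) => ((i : Int), ((i : Nat) : Int) + ((((p ++ xs).drop (i+1)).takeWhile t2bNotStop).length : Int),
        ((PySem.Str.split? ((p ++ xs).getD i "") "-").getD []).getD 1 "")) = t2Spec xs (p.length : Int) := by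
  induction xs with
  | nil => intro p; simp [t2Spec]
  | cons t rest ih =>
    intro p
    have hget : (p ++ t :: rest).getD p.length "" = t := by
      rw [List.getD_eq_getElem?_getD, List.getElem?_append_right (Nat.le_refl _)]
      simp
    have htail := ih (p ++ [t])
    rw [← List.append_cons] at htail
    have hlen : (p ++ [t]).length = p.length + 1 := by simp
    rw [hlen] at htail
    have hdrop : (p ++ t :: rest).drop (p.length + 1) = rest := by
      rw [List.append_cons, ← hlen]; exact List.drop_left
    rw [List.length_cons, List.range'_succ, List.filter_cons]
    by_cases hstart : t2bIsStart t
    · simp only [hget, hstart, if_pos, List.map_cons, htail, hdrop, t2Spec]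
      push_cast
      ring_nf
    · simp only [hget, hstart, Bool.false_eq_true, t2Spec]
      rw [if_neg (by simp), if_neg (by simp), htail]
      push_cast
      ring_nf

def t2aFin (r : List (Int × Int × String) × List String × Int) (last : Int) : List (Int × Int × String) :=
  if r.2.2 ≠ -1 then r.1 ++ [(r.2.2, last, r.2.1.getD 0 "")] else r.1

lemma t2a_gen (xs : List String) :
    (∀ (i : Int) (acc : List (Int × Int × String)), 0 ≤ i →
        t2aFin (t2aGo xs i acc [] (-1)) (i + xs.length - 1) = acc ++ t2Spec xs i)
    ∧ (∀ (i b : Int) (acc : List (Int × Int × String)) (p : String) (s' : List String), 0 ≤ i → 0 ≤ b →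
        t2aFin (t2aGo xs i acc (p :: s') b) (i + xs.length - 1)
          = acc ++ (b, i + ((xs.takeWhile t2bNotStop).length : Int) - 1, p) :: t2Spec xs i) := by
  induction xs with
  | nil =>
    constructor
    · intro i acc _; simp [t2aGo, t2aFin, t2Spec]
    · intro i b acc p s' hi hb
      have hb' : b ≠ -1 := by omega
      simp [t2aGo, t2aFin, t2Spec, hb']
  | cons t rest ih =>
    obtain ⟨ih1, ih2⟩ := ih
    have hlen : ∀ (i : Int), i + ((t :: rest).length : Int) - 1 = (i + 1) + (rest.length : Int) - 1 := by
      intro i; simp; ring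
    constructor
    · intro i acc hi
      rw [hlen]
      by_cases ht : t = "O"
      · subst ht
        have h1 := ih1 (i+1) acc (by omega)
        simp only [t2aGo]
        norm_num
        rw [h1]
        simp [t2Spec, t2bIsStart]
      · by_cases hcur : ((PySem.Str.split? t "-").getD []).getD 0 "" = "B"
        · have h2 := ih2 (i+1) i acc (((PySem.Str.split? t "-").getD []).getD 1 "") [] (by omega) hi
          simp only [t2aGo, beq_iff_eq]
          have hcur' : ((PySem.Str.split? t "-").getD [])[0]?.getD "" = "B" := by simpa using hcur
          rw [if_neg ht, if_pos (by simp [hcur']), if_neg (by omega), h2]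
          simp only [t2Spec]
          rw [if_pos (by simp [t2bIsStart, ht, hcur'])]
          have e : ∀ k : Int, i + 1 + k - 1 = i + k := by intro k; ring
          rw [e]
        · have h1 := ih1 (i+1) acc (by omega)
          have hcur' : ¬(((PySem.Str.split? t "-").getD [])[0]?.getD "" = "B") := by simpa using hcur
          simp only [t2aGo, beq_iff_eq]
          rw [if_neg ht, if_neg (by simp [hcur']), if_neg (by omega), h1]
          simp only [t2Spec]
          rw [if_neg (by simp [t2bIsStart, hcur'])]
    · intro i b acc p s' hi hb
      rw [hlen]
      have hbne : b ≠ -1 := by omega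
      by_cases ht : t = "O"
      · subst ht
        have h1 := ih1 (i+1) (acc ++ [(b, i-1, p)]) (by omega)
        simp only [t2aGo, beq_iff_eq, if_true]
        rw [if_pos hbne, List.getD_cons_zero, h1]
        simp only [t2Spec]
        rw [if_neg (by simp [t2bIsStart])]
        have hns : t2bNotStop "O" = false := by decide
        simp [hns]
      · by_cases hcur : ((PySem.Str.split? t "-").getD []).getD 0 "" = "B"
        · have hcur' : ((PySem.Str.split? t "-").getD [])[0]?.getD "" = "B" := by simpa using hcur
          have h2 := ih2 (i+1) i (acc ++ [(b, i-1, p)]) (((PySem.Str.split? t "-").getD []).getD 1 "") [] (by omega) hi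
          simp only [t2aGo, beq_iff_eq]
          rw [if_neg ht, if_pos (by simp [hcur']), if_pos hbne, List.getD_cons_zero, h2]
          simp only [t2Spec]
          rw [if_pos (by simp [t2bIsStart, ht, hcur'])]
          have hns : t2bNotStop t = false := by simp [t2bNotStop, t2bIsStop, hcur']
          have e : ∀ k : Int, i + 1 + k - 1 = i + k := by intro k; ring
          rw [e]
          simp [hns]
        · have hcur' : ¬(((PySem.Str.split? t "-").getD [])[0]?.getD "" = "B") := by simpa using hcur
          have h2 := ih2 (i+1) b acc p (s' ++ [((PySem.Str.split? t "-").getD []).getD 1 ""]) (by omega) hb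
          simp only [t2aGo, beq_iff_eq]
          rw [if_neg ht, if_neg (by simp [hcur']), if_pos hbne, List.cons_append, h2]
          simp only [t2Spec]
          rw [if_neg (by simp [t2bIsStart, hcur'])]
          have hns : t2bNotStop t = true := by simp [t2bNotStop, t2bIsStop, ht, hcur']
          simp [hns]
          ring

lemma a_eq_spec (l : List String) : tag2aspect_sentiment l = t2Spec l 0 := by
  have h := (t2a_gen l).1 0 [] (by omega)
  unfold tag2aspect_sentiment
  rcases hgo : t2aGo l 0 [] [] (-1) with ⟨acc, sents, beg⟩
  rw [hgo] at h
  unfold t2aFin at h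
  simp only at h ⊢
  have e : (0:Int) + (l.length:Int) - 1 = (l.length:Int) - 1 := by ring
  rw [e] at h
  simpa using h

lemma alt_eq_spec (l : List String) : tag2aspect_sentiment_alt l = t2Spec l 0 := by
  unfold tag2aspect_sentiment_alt
  simp only [List.length_map, extend_map, parse_start, parse_sent, Nat.cast_add,
    List.range_eq_range']
  have h := t2b_gen l []
  simp only [List.nil_append, List.length_nil, Nat.cast_zero] at h
  exact h

-- ===== VERDICT (by name: the statement is the Claim_ definition above) =====
theorem tag2aspect_sentiment_spec : Claim_equal_tag2aspect_sentiment := by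
  intro l _ _
  unfold Spec_tag2aspect_sentiment
  rw [a_eq_spec, alt_eq_spec]
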